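-- pv_equiv track=rewrite | github.com/Ouldouz-Neysari/Data-structure | CA2/CA2_1.py | is_patterned
-- ===== SOURCE A (Python) =====
-- def template_part_finder(template_part,match_arr):
--     for i in range(len(match_arr)):
--         if(match_arr[i][0]==template_part):
--             return match_arr[i][1]
--     else:
--         return "-1"
--
-- def is_patterned(main_str,template,match_arr,string_index,template_index):
--     if(string_index==len(main_str) and template_index==len(template)):
--         return True
--     elif(string_index!=len(main_str) and template_index==len(template)):
--         return False
--     elif(string_index==len(main_str) and template_index!=len(template)):
--         return False
--     else :
--         this_temp=template[template_index]
--         if(template_part_finder(this_temp,match_arr)!="-1"):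
--             previous_part=template_part_finder(this_temp,match_arr)
--             if(len(main_str[string_index:])<len(previous_part)):
--                 return False
--             else:
--                 current_part=main_str[string_index:string_index+len(previous_part)]
--                 if(current_part!=previous_part):
--                     return False
--                 else:
--                     return is_patterned(main_str,template,match_arr,string_index+len(previous_part),template_index+1)
--         else :
--             for k in range(1,len(main_str)-string_index+1):
--                 match_arr.append([template[template_index],main_str[string_index:string_index+k]])
--                 if(is_patterned(main_str,template,match_arr,string_index+k,template_index+1)):
--                     return True
--                 garbage=match_arr.pop()
--             return False
-- ===== SOURCE B (Python) =====
-- # B: explicit-stack iterative backtracker (same search order as the recursion, no Python recursion).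
-- # Each worklist item is an independent (string_index, template_index, bindings) state; bound tokens are
-- # consumed by an inner deterministic advance loop, a free token pushes its candidate lengths (largest
-- # first, so length 1 is tried first). On success the winning bindings are written back into match_arr.
--
-- def template_part_finder(template_part, match_arr):
--     for pair in match_arr:
--         if pair[0] == template_part:
--             return pair[1]
--     return "-1"
--
--
-- def is_patterned(main_str, template, match_arr, string_index, template_index):
--     n = len(main_str)
--     m = len(template)
--     work = [(string_index, template_index, match_arr)]
--     while work:
--         si, ti, binds = work.pop()
--         # deterministic advance over already-bound template tokens
--         free = False
--         while True:
--             if si == n and ti == m: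
--                 match_arr[:] = binds
--                 return True
--             if si == n or ti == m:
--                 break  # dead end
--             tok = template[ti]
--             bound = template_part_finder(tok, binds)
--             if bound == "-1":
--                 free = True
--                 break  # free token: choice point
--             if len(main_str[si:]) < len(bound) or main_str[si:si + len(bound)] != bound:
--                 break  # dead end
--             si += len(bound)
--             ti += 1
--         if free:
--             for k in range(n - si, 0, -1):
--                 work.append((si + k, ti + 1, binds + [[tok, main_str[si:si + k]]]))
--     return False
-- ===== Notes on version B (the rewrite author's own statement) =====
-- stated objective: alternative
-- what changed: Replaces the recursive backtracker (append/recurse/pop on a shared match_arr) with an iterative explicit-stack DFS: a worklist of independent (string_index, template_index, bindings) states, an inner deterministic-advance loop over already-bound tokens, and free tokens pushing their candidate lengths largest-first; no Python recursion at all.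
-- outside the precondition, e.g. on is_patterned('a', ['x'], [['x', 'a'], []], 0, 0): A returns True, B returns True; on is_patterned('a', ['y', 'x'], [['x']], 0, 0): A returns False, B returns False
import Mathlib
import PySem

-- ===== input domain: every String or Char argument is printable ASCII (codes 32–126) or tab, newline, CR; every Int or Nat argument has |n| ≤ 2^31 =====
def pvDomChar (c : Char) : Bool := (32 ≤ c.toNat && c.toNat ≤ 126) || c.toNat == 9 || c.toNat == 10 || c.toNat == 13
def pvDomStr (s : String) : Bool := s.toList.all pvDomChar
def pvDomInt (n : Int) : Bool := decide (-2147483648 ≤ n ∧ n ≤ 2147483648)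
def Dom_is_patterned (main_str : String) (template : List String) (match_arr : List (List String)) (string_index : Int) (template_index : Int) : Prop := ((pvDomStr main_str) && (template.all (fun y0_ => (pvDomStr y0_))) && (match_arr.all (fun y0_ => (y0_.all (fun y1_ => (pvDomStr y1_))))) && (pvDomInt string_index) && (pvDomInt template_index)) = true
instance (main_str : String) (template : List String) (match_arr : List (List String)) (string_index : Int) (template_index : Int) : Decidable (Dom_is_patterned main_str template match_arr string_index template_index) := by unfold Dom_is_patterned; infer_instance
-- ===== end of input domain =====

-- B replaces A's recursive backtracker by an explicit-worklist iterative DFS (same search order,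
-- same return value). A mutates match_arr in place; the equivalence proved here is about the
-- RETURN value (Python B writes the same winning bindings back into match_arr on success).


-- ===== PORT A =====
-- template_part_finder (helper textually identical in Source A and Source B): linear scan, "-1" sentinel.
-- Entry access e[0]/e[1] is List.getD — exact on Pre_, where Python's e[0]/e[1] never raise.
def template_part_finder (template_part : String) (match_arr : List (List String)) : String :=
  match match_arr with
  | [] => "-1"
  | e :: rest =>
    if e.getD 0 "" = template_part then e.getD 1 ""
    else template_part_finder template_part rest

-- A's recursion, with fuel as a recursion-depth guard only: every recursive call has
-- template_index+1 and is guarded by pyGet? = some (where it is none Python raises IndexError —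
-- excluded by Pre_), so the wrapper's fuel (len(template) - template_index) + 1 is never exhausted.
-- A's inner 'for k in range(1, …): if rec: return True … return False' loop is .any on that range.
def pvGoA (ms : List Char) (tmpl : List String) : Nat → List (List String) → Int → Int → Bool
  | 0, _, _, _ => false
  | fuel + 1, marr, si, ti =>
    if si = (ms.length : Int) ∧ ti = (tmpl.length : Int) then true
    else if si ≠ (ms.length : Int) ∧ ti = (tmpl.length : Int) then false
    else if si = (ms.length : Int) ∧ ti ≠ (tmpl.length : Int) then false
    else
      match PySem.List.pyGet? tmpl ti with
      | none => false  -- template[template_index] raises IndexError in Python; outside Pre_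
      | some this_temp =>
        if template_part_finder this_temp marr ≠ "-1" then
          let previous_part := template_part_finder this_temp marr
          if ((PySem.List.slice ms (some si) none).length : Int) < (previous_part.length : Int) then false
          else
            if PySem.List.slice ms (some si) (some (si + (previous_part.length : Int))) ≠ previous_part.toList then false
            else pvGoA ms tmpl fuel marr (si + (previous_part.length : Int)) (ti + 1)
        else
          (PySem.List.pyRange 1 ((ms.length : Int) - si + 1) 1).any (fun k =>
            pvGoA ms tmpl fuel
              (marr ++ [[this_temp, String.ofList (PySem.List.slice ms (some si) (some (si + k)))]])
              (si + k) (ti + 1))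

def is_patterned (main_str : String) (template : List String) (match_arr : List (List String)) (string_index : Int) (template_index : Int) : Bool :=
  pvGoA main_str.toList template (((template.length : Int) - template_index).toNat + 1) match_arr string_index template_index

-- ===== PORT B =====
-- result of Source B's inner deterministic-advance loop
inductive PvAdv where
  | success : PvAdv
  | dead : PvAdv
  | free : Int → Int → String → PvAdv
deriving DecidableEq, Repr

-- Source B's inner 'while True:' loop: consume bound tokens until success, a dead end, or a free
-- token. fuel is a totality guard only (structural recursion); pvAdvance_spec below shows the
-- fuel pvLoop supplies is never exhausted.
def pvAdvance (ms : List Char) (tmpl : List String) (binds : List (List String)) : Nat → Int → Int → PvAdv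
  | 0, _, _ => .dead
  | fuel + 1, si, ti =>
    if si = (ms.length : Int) ∧ ti = (tmpl.length : Int) then .success
    else if si = (ms.length : Int) ∨ ti = (tmpl.length : Int) then .dead
    else
      match PySem.List.pyGet? tmpl ti with
      | none => .dead  -- template[ti] raises IndexError in Python; outside Pre_
      | some tok =>
        if template_part_finder tok binds = "-1" then .free si ti tok
        else
          if ((PySem.List.slice ms (some si) none).length : Int) < ((template_part_finder tok binds).length : Int)
              ∨ PySem.List.slice ms (some si) (some (si + ((template_part_finder tok binds).length : Int))) ≠ (template_part_finder tok binds).toList then .dead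
          else pvAdvance ms tmpl binds fuel (si + ((template_part_finder tok binds).length : Int)) (ti + 1)

-- Source B's outer 'while work:' loop over independent (si, ti, bindings) states; a free token pushes
-- its candidate lengths largest-first (so length 1 is popped first). fuel is a totality guard
-- only; pvLoop_eq below proves the wrapper's fuel is never exhausted.
def pvLoop (ms : List Char) (tmpl : List String) : Nat → List (Int × Int × List (List String)) → Bool
  | 0, _ => false
  | _ + 1, [] => false
  | fuel + 1, (si, ti, binds) :: rest =>
    match pvAdvance ms tmpl binds (((tmpl.length : Int) - ti).toNat + 1) si ti with
    | .success => true
    | .dead => pvLoop ms tmpl fuel rest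
    | .free si' ti' tok =>
      pvLoop ms tmpl fuel
        ((PySem.List.pyRange ((ms.length : Int) - si') 0 (-1)).foldl
          (fun st k =>
            (si' + k, ti' + 1,
              binds ++ [[tok, String.ofList (PySem.List.slice ms (some si') (some (si' + k)))]]) :: st)
          rest)

def is_patterned_alt (main_str : String) (template : List String) (match_arr : List (List String)) (string_index : Int) (template_index : Int) : Bool :=
  let ms := main_str.toList
  -- fuel: totality guard for the worklist loop, proven sufficient in pvLoop_eq (min/max only clamp
  -- the exponent so it is cheap to compute on far-out indices, where the loop stops immediately)
  let C : Nat := ((ms.length : Int) - min string_index 0).toNat + 2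
  pvLoop ms template
    (C ^ (((template.length : Int) - max template_index (-(template.length : Int))).toNat + 1) + 1)
    [(string_index, template_index, match_arr)]

-- ===== PRECONDITION & SPEC =====
-- Pre_ excludes exactly the inputs where the Python A raises IndexError: template[template_index]
-- out of range while neither index is at its end, the finder reading e[0] of an empty match_arr
-- entry, or reading e[1] of a length-1 entry that is the first entry matching a queried token.
-- The condition is a closed-form over-approximation: it ranges over all tokens of the template
-- suffix rather than only those the search actually visits, so a few inputs where A returns
-- normally (a short entry whose token the search never queries) are also excluded — see cites.
def Pre_is_patterned (main_str : String) (template : List String) (match_arr : List (List String)) (string_index : Int) (template_index : Int) : Prop :=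
  string_index = (main_str.toList.length : Int) ∨ template_index = (template.length : Int) ∨
    (-(template.length : Int) ≤ template_index ∧ template_index ≤ (template.length : Int) ∧
      (∀ e ∈ match_arr, e ≠ []) ∧
      (∀ t ∈ (if 0 ≤ template_index then template.drop template_index.toNat else template),
        ((match_arr.find? (fun x => decide (x.head? = some t))).all
          (fun e => decide (2 ≤ e.length))) = true))
instance (main_str : String) (template : List String) (match_arr : List (List String)) (string_index : Int) (template_index : Int) : Decidable (Pre_is_patterned main_str template match_arr string_index template_index) := by unfold Pre_is_patterned; infer_instance

def pvWitness_is_patterned : String × List String × List (List String) × Int × Int :=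
  ("abab", ["x", "x"], [], 0, 0)

def Spec_is_patterned (main_str : String) (template : List String) (match_arr : List (List String)) (string_index : Int) (template_index : Int) (out : Bool) : Prop := out = is_patterned_alt main_str template match_arr string_index template_index
instance (main_str : String) (template : List String) (match_arr : List (List String)) (string_index : Int) (template_index : Int) (out : Bool) : Decidable (Spec_is_patterned main_str template match_arr string_index template_index out) := by unfold Spec_is_patterned; infer_instance

-- ===== CLAIM (what is proved, stated in full; the proofs are below) =====
def Claim_equal_is_patterned : Prop := ∀ (main_str : String) (template : List String) (match_arr : List (List String)) (string_index : Int) (template_index : Int), Dom_is_patterned main_str template match_arr string_index template_index → Pre_is_patterned main_str template match_arr string_index template_index → Spec_is_patterned main_str template match_arr string_index template_index (is_patterned main_str template match_arr string_index template_index)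

-- ===== LEMMAS AND PROOFS =====

-- a successful pyGet? bounds the index
theorem pvGet_lt {α : Type} (xs : List α) (i : Int) (x : α)
    (h : PySem.List.pyGet? xs i = some x) : i < (xs.length : Int) := by
  by_cases hi : 0 ≤ i
  · rw [PySem.List.pyGet?_of_nonneg xs hi] at h
    obtain ⟨hlt, -⟩ := List.getElem?_eq_some_iff.mp h
    omega
  · omega


-- A's value at the canonical fuel (len(template) - ti) + 1; pvA_* unfold it one step per branch
def pvB (tmpl : List String) (ti : Int) : Nat := (((tmpl.length : Int)) - ti).toNat + 1
def pvA (ms : List Char) (tmpl : List String) (marr : List (List String)) (si ti : Int) : Bool :=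
  pvGoA ms tmpl (pvB tmpl ti) marr si ti
theorem pvA_bound (ms : List Char) (tmpl : List String) (marr : List (List String)) {si ti : Int} {tok : String}
    (h1 : si ≠ (ms.length : Int)) (h2 : ti ≠ (tmpl.length : Int))
    (hg : PySem.List.pyGet? tmpl ti = some tok)
    (hf : template_part_finder tok marr ≠ "-1") :
    pvA ms tmpl marr si ti =
      (if ((PySem.List.slice ms (some si) none).length : Int) < ((template_part_finder tok marr).length : Int) then false
       else if PySem.List.slice ms (some si) (some (si + ((template_part_finder tok marr).length : Int))) ≠ (template_part_finder tok marr).toList then false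
       else pvA ms tmpl marr (si + ((template_part_finder tok marr).length : Int)) (ti + 1)) := by
  have hti : ti < (tmpl.length : Int) := pvGet_lt tmpl ti tok hg
  have hfuel : (((tmpl.length : Int)) - ti).toNat = pvB tmpl (ti + 1) := by
    unfold pvB; omega
  show pvGoA ms tmpl ((((tmpl.length : Int)) - ti).toNat + 1) marr si ti = _
  rw [pvGoA]
  rw [if_neg (by tauto : ¬(si = (ms.length : Int) ∧ ti = (tmpl.length : Int))),
      if_neg (by tauto : ¬(si ≠ (ms.length : Int) ∧ ti = (tmpl.length : Int))),
      if_neg (by tauto : ¬(si = (ms.length : Int) ∧ ti ≠ (tmpl.length : Int)))]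
  simp only [hg]
  rw [if_pos hf]
  simp only [hfuel]
  rfl
theorem pvA_free (ms : List Char) (tmpl : List String) (marr : List (List String)) {si ti : Int} {tok : String}
    (h1 : si ≠ (ms.length : Int)) (h2 : ti ≠ (tmpl.length : Int))
    (hg : PySem.List.pyGet? tmpl ti = some tok)
    (hf : template_part_finder tok marr = "-1") :
    pvA ms tmpl marr si ti =
      (PySem.List.pyRange 1 ((ms.length : Int) - si + 1) 1).any (fun k =>
        pvA ms tmpl (marr ++ [[tok, String.ofList (PySem.List.slice ms (some si) (some (si + k)))]])
          (si + k) (ti + 1)) := by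
  have hti : ti < (tmpl.length : Int) := pvGet_lt tmpl ti tok hg
  have hfuel : (((tmpl.length : Int)) - ti).toNat = pvB tmpl (ti + 1) := by
    unfold pvB; omega
  show pvGoA ms tmpl ((((tmpl.length : Int)) - ti).toNat + 1) marr si ti = _
  rw [pvGoA]
  rw [if_neg (by tauto : ¬(si = (ms.length : Int) ∧ ti = (tmpl.length : Int))),
      if_neg (by tauto : ¬(si ≠ (ms.length : Int) ∧ ti = (tmpl.length : Int))),
      if_neg (by tauto : ¬(si = (ms.length : Int) ∧ ti ≠ (tmpl.length : Int)))]
  simp only [hg]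
  rw [if_neg (by simp [hf])]
  simp only [hfuel]
  rfl
theorem pvA_end_true (ms : List Char) (tmpl : List String) (marr : List (List String)) {si ti : Int}
    (h : si = (ms.length : Int) ∧ ti = (tmpl.length : Int)) :
    pvA ms tmpl marr si ti = true := by
  show pvGoA ms tmpl ((((tmpl.length : Int)) - ti).toNat + 1) marr si ti = true
  rw [pvGoA, if_pos h]

theorem pvA_half_false (ms : List Char) (tmpl : List String) (marr : List (List String)) {si ti : Int}
    (h : si = (ms.length : Int) ∨ ti = (tmpl.length : Int))
    (hn : ¬(si = (ms.length : Int) ∧ ti = (tmpl.length : Int))) :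
    pvA ms tmpl marr si ti = false := by
  show pvGoA ms tmpl ((((tmpl.length : Int)) - ti).toNat + 1) marr si ti = false
  rw [pvGoA, if_neg hn]
  rcases h with h | h
  · rw [if_neg (by tauto), if_pos ⟨h, by tauto⟩]
  · rw [if_pos ⟨by tauto, h⟩]

theorem pvA_none_false (ms : List Char) (tmpl : List String) (marr : List (List String)) {si ti : Int}
    (hn : ¬(si = (ms.length : Int) ∧ ti = (tmpl.length : Int)))
    (hor : ¬(si = (ms.length : Int) ∨ ti = (tmpl.length : Int)))
    (hg : PySem.List.pyGet? tmpl ti = none) :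
    pvA ms tmpl marr si ti = false := by
  show pvGoA ms tmpl ((((tmpl.length : Int)) - ti).toNat + 1) marr si ti = false
  rw [pvGoA, if_neg hn, if_neg (by tauto), if_neg (by tauto)]
  simp only [hg]

theorem pvAdvance_spec (ms : List Char) (tmpl : List String) (binds : List (List String)) :
    ∀ (fuel : Nat) (si ti : Int), ((tmpl.length : Int) - ti).toNat < fuel →
      (pvAdvance ms tmpl binds fuel si ti = .success → pvA ms tmpl binds si ti = true) ∧
      (pvAdvance ms tmpl binds fuel si ti = .dead → pvA ms tmpl binds si ti = false) ∧
      (∀ si' ti' tok, pvAdvance ms tmpl binds fuel si ti = .free si' ti' tok →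
        pvA ms tmpl binds si ti = pvA ms tmpl binds si' ti' ∧
        PySem.List.pyGet? tmpl ti' = some tok ∧ template_part_finder tok binds = "-1" ∧
        si ≤ si' ∧ ti ≤ ti' ∧ si' ≠ (ms.length : Int) ∧ ti' < (tmpl.length : Int)) := by
  intro fuel
  induction fuel with
  | zero => intro si ti hfu; omega
  | succ fuel ih =>
    intro si ti hfu
    by_cases hend : si = (ms.length : Int) ∧ ti = (tmpl.length : Int)
    · rw [pvAdvance, if_pos hend]
      refine ⟨fun _ => pvA_end_true ms tmpl binds hend, fun h => ?_, fun si' ti' tok h => ?_⟩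
      · cases h
      · cases h
    by_cases hor : si = (ms.length : Int) ∨ ti = (tmpl.length : Int)
    · rw [pvAdvance, if_neg hend, if_pos hor]
      refine ⟨fun h => ?_, fun _ => pvA_half_false ms tmpl binds hor hend, fun si' ti' tok h => ?_⟩
      · cases h
      · cases h
    cases hg : PySem.List.pyGet? tmpl ti with
    | none =>
      rw [pvAdvance, if_neg hend, if_neg hor]
      refine ⟨fun h => ?_, fun _ => pvA_none_false ms tmpl binds hend hor hg, fun si' ti' tok h => ?_⟩
      · rw [hg] at h; cases h
      · rw [hg] at h; cases h
    | some tok =>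
      have hti : ti < (tmpl.length : Int) := pvGet_lt tmpl ti tok hg
      rw [pvAdvance, if_neg hend, if_neg hor]
      by_cases hfr : template_part_finder tok binds = "-1"
      · rw [hg]
        simp only [if_pos hfr]
        refine ⟨fun h => ?_, fun h => ?_, ?_⟩
        · cases h
        · cases h
        intro si' ti' tok' h
        cases h
        exact ⟨rfl, hg, hfr, le_refl _, le_refl _, fun h => hor (Or.inl h), hti⟩
      by_cases hdead : ((PySem.List.slice ms (some si) none).length : Int) < ((template_part_finder tok binds).length : Int)
          ∨ PySem.List.slice ms (some si) (some (si + ((template_part_finder tok binds).length : Int))) ≠ (template_part_finder tok binds).toList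
      · rw [hg]
        simp only [if_neg hfr, if_pos hdead]
        have hA : pvA ms tmpl binds si ti = false := by
          rw [pvA_bound ms tmpl binds (by tauto) (by tauto) hg hfr]
          rcases hdead with hd | hd
          · rw [if_pos hd]
          · by_cases hlen : ((PySem.List.slice ms (some si) none).length : Int) < ((template_part_finder tok binds).length : Int)
            · rw [if_pos hlen]
            · rw [if_neg hlen, if_pos hd]
        refine ⟨fun h => ?_, fun _ => hA, fun si' ti' tok' h => ?_⟩
        · cases h
        · cases h
      · rw [hg]
        simp only [if_neg hfr, if_neg hdead]
        rw [not_or, not_lt, not_ne_iff] at hdead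
        have hstep : pvA ms tmpl binds si ti =
            pvA ms tmpl binds (si + ((template_part_finder tok binds).length : Int)) (ti + 1) := by
          rw [pvA_bound ms tmpl binds (by tauto) (by tauto) hg hfr,
              if_neg (not_lt.mpr hdead.1), if_neg (by simp [hdead.2])]
        obtain ⟨ihs, ihd, ihf⟩ := ih (si + ((template_part_finder tok binds).length : Int)) (ti + 1) (by omega)
        refine ⟨fun h => hstep.trans (ihs h), fun h => hstep.trans (ihd h), ?_⟩
        intro si' ti' tok' h
        obtain ⟨e1, e2, e3, e4, e5, e6, e7⟩ := ihf si' ti' tok' h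
        exact ⟨hstep.trans e1, e2, e3, by omega, by omega, e6, e7⟩
def pvW (tmpl : List String) (C : Nat) (it : Int × Int × List (List String)) : Nat :=
  C ^ ((((tmpl.length : Int)) - it.2.1).toNat + 1)
def pvPhi (tmpl : List String) (C : Nat) (items : List (Int × Int × List (List String))) : Nat :=
  (items.map (pvW tmpl C)).sum

theorem pv_any_foldl_push {α β : Type} (g : α → β) (p : β → Bool) :
    ∀ (ks : List α) (acc : List β),
      ((ks.foldl (fun st k => g k :: st) acc).any p) = (ks.any (fun k => p (g k)) || acc.any p) := by
  intro ks
  induction ks with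
  | nil => intro acc; simp
  | cons k ks ih =>
    intro acc
    simp only [List.foldl_cons, ih (g k :: acc), List.any_cons]
    cases p (g k) <;> simp

theorem pv_sum_foldl_push {α β : Type} (g : α → β) (w : β → Nat) (c : Nat) (hw : ∀ k, w (g k) = c) :
    ∀ (ks : List α) (acc : List β),
      (((ks.foldl (fun st k => g k :: st) acc).map w).sum) = ks.length * c + (acc.map w).sum := by
  intro ks
  induction ks with
  | nil => intro acc; simp
  | cons k ks ih =>
    intro acc
    simp only [List.foldl_cons, ih (g k :: acc), List.map_cons, List.sum_cons, hw k, List.length_cons]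
    ring

theorem pv_mem_foldl_push {α β : Type} (g : α → β) :
    ∀ (ks : List α) (acc : List β) (x : β),
      x ∈ ks.foldl (fun st k => g k :: st) acc → (∃ k ∈ ks, x = g k) ∨ x ∈ acc := by
  intro ks
  induction ks with
  | nil => intro acc x h; exact Or.inr h
  | cons k ks ih =>
    intro acc x h
    rcases ih (g k :: acc) x h with ⟨k', hk', rfl⟩ | hx
    · exact Or.inl ⟨k', List.mem_cons_of_mem _ hk', rfl⟩
    · rcases List.mem_cons.mp hx with rfl | hx
      · exact Or.inl ⟨k, List.mem_cons_self .., rfl⟩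
      · exact Or.inr hx

theorem pvLoop_eq (ms : List Char) (tmpl : List String) (C : Nat) (slo : Int)
    (hC : ((ms.length : Int) - slo).toNat + 2 ≤ C) :
    ∀ (fuel : Nat) (items : List (Int × Int × List (List String))),
      (∀ it ∈ items, slo ≤ it.1) → pvPhi tmpl C items ≤ fuel →
      pvLoop ms tmpl fuel items = items.any (fun it => pvA ms tmpl it.2.2 it.1 it.2.1) := by
  intro fuel
  induction fuel using Nat.strong_induction_on with
  | _ fuel IH =>
    intro items hslo hphi
    match items with
    | [] => cases fuel <;> simp [pvLoop]
    | (si, ti, binds) :: rest =>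
      have hw1 : 1 ≤ pvW tmpl C (si, ti, binds) := Nat.one_le_pow _ _ (by omega)
      have hphi' : pvPhi tmpl C ((si, ti, binds) :: rest) = pvW tmpl C (si, ti, binds) + pvPhi tmpl C rest := by
        simp [pvPhi]
      obtain ⟨f, rfl⟩ : ∃ f, fuel = f + 1 := ⟨fuel - 1, by omega⟩
      rw [pvLoop]
      obtain ⟨hs, hd, hfr⟩ := pvAdvance_spec ms tmpl binds (((tmpl.length : Int) - ti).toNat + 1) si ti (by omega)
      cases hadv : pvAdvance ms tmpl binds (((tmpl.length : Int) - ti).toNat + 1) si ti with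
      | success => simp [List.any_cons, hs hadv]
      | dead =>
        rw [IH f (by omega) rest (fun it h => hslo it (List.mem_cons_of_mem _ h)) (by omega)]
        simp [List.any_cons, hd hadv]
      | free si' ti' tok =>
        dsimp only
        obtain ⟨hAeq, hget, hfind, hsile, htile, hsne, htlt⟩ := hfr si' ti' tok hadv
        have hslohead : slo ≤ si := hslo _ (List.mem_cons_self ..)
        have hd1 : ((((tmpl.length : Int)) - (ti' + 1)).toNat + 1) + 1 ≤ (((tmpl.length : Int)) - ti).toNat + 1 := by omega
        set c : Nat := C ^ ((((tmpl.length : Int)) - (ti' + 1)).toNat + 1) with hcdef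
        have hcpos : 1 ≤ c := Nat.one_le_pow _ _ (by omega)
        set g : Int → (Int × Int × List (List String)) := fun k =>
          (si' + k, ti' + 1,
            binds ++ [[tok, String.ofList (PySem.List.slice ms (some si') (some (si' + k)))]]) with hgdef
        have hL : (PySem.List.pyRange ((ms.length : Int) - si') 0 (-1)).length = ((ms.length : Int) - si').toNat := by
          rw [PySem.List.length_pyRange_neg_one]; congr 1; omega
        have hLle : ((ms.length : Int) - si').toNat + 2 ≤ C := by
          have : ((ms.length : Int) - si').toNat ≤ ((ms.length : Int) - slo).toNat := by omega
          omega
        have hphiS : pvPhi tmpl C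
            ((PySem.List.pyRange ((ms.length : Int) - si') 0 (-1)).foldl (fun st k => g k :: st) rest)
            ≤ f := by
          have e1 : pvPhi tmpl C ((PySem.List.pyRange ((ms.length : Int) - si') 0 (-1)).foldl (fun st k => g k :: st) rest)
              = ((ms.length : Int) - si').toNat * c + pvPhi tmpl C rest := by
            unfold pvPhi
            rw [pv_sum_foldl_push g (pvW tmpl C) c (fun k => rfl), hL]
          have e2 : ((ms.length : Int) - si').toNat * c + 1 ≤ C * c := by
            calc ((ms.length : Int) - si').toNat * c + 1
                ≤ ((ms.length : Int) - si').toNat * c + c := by omega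
              _ = (((ms.length : Int) - si').toNat + 1) * c := by ring
              _ ≤ C * c := Nat.mul_le_mul_right c (by omega)
          have e3 : C * c ≤ pvW tmpl C (si, ti, binds) := by
            have : C * c = C ^ (((((tmpl.length : Int)) - (ti' + 1)).toNat + 1) + 1) := by
              rw [pow_succ]; ring
            rw [this]
            exact Nat.pow_le_pow_right (by omega) hd1
          omega
        have hsloS : ∀ it ∈ (PySem.List.pyRange ((ms.length : Int) - si') 0 (-1)).foldl (fun st k => g k :: st) rest,
            slo ≤ it.1 := by
          intro it hit
          rcases pv_mem_foldl_push g _ rest it hit with ⟨k, hk, rfl⟩ | hit'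
          · have := PySem.List.mem_pyRange_neg_one.mp hk
            simp only [hgdef]
            omega
          · exact hslo it (List.mem_cons_of_mem _ hit')
        rw [IH f (by omega) _ hsloS hphiS]
        rw [pv_any_foldl_push g _]
        rw [List.any_cons]
        congr 1
        rw [hAeq, pvA_free ms tmpl binds hsne (by omega) hget hfind]
        rw [PySem.List.pyRange_neg_one_eq_reverse, List.any_reverse]
        simp [hgdef]
theorem is_patterned_spec_main (main_str : String) (template : List String) (match_arr : List (List String)) (si ti : Int)
    (hpre : Pre_is_patterned main_str template match_arr si ti) :
    is_patterned main_str template match_arr si ti = is_patterned_alt main_str template match_arr si ti := by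
  unfold is_patterned is_patterned_alt
  show pvA main_str.toList template match_arr si ti =
    pvLoop main_str.toList template
      ((((main_str.toList.length : Int) - min si 0).toNat + 2) ^
        (((template.length : Int) - max ti (-(template.length : Int))).toNat + 1) + 1)
      [(si, ti, match_arr)]
  by_cases hlow : -(template.length : Int) ≤ ti
  · have hmax : max ti (-(template.length : Int)) = ti := by omega
    rw [hmax]
    rw [pvLoop_eq main_str.toList template _ (min si 0) (le_refl _) _ [(si, ti, match_arr)]
      (by intro it hit; rcases List.mem_singleton.mp hit with rfl; exact min_le_left _ _)
      (by simp [pvPhi, pvW])]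
    simp
  · have hm0 : (0 : Int) ≤ (template.length : Int) := by positivity
    have hsin : si = (main_str.toList.length : Int) := by
      rcases hpre with h | h | h
      · exact h
      · omega
      · omega
    have htne : ti ≠ (template.length : Int) := by omega
    have hA : pvA main_str.toList template match_arr si ti = false :=
      pvA_half_false _ _ _ (Or.inl hsin) (fun hh => htne hh.2)
    rw [hA]
    obtain ⟨F, hF⟩ : ∃ F, (((main_str.toList.length : Int) - min si 0).toNat + 2) ^
        (((template.length : Int) - max ti (-(template.length : Int))).toNat + 1) + 1 = F + 1 :=
      ⟨_, rfl⟩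
    rw [hF, pvLoop]
    rw [pvAdvance, if_neg (fun hh => htne hh.2), if_pos (Or.inl hsin)]
    dsimp only
    cases F <;> simp [pvLoop]

-- ===== VERDICT (by name: the statement is the Claim_ definition above) =====
theorem is_patterned_spec : Claim_equal_is_patterned := by
  intro main_str template match_arr string_index template_index hdom hpre
  exact is_patterned_spec_main main_str template match_arr string_index template_index hpre
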